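-- pv_equiv track=rewrite | github.com/Kunalsharma25/Assignment__4 | filtering/filters.py | is_india_based
-- ===== SOURCE A (Python) =====
-- from typing import List, Dict
--
-- INDIA_INDICATORS = [
--     "india", "bharat", "mumbai", "delhi", "bangalore", "bengaluru",
--     "hyderabad", "chennai", "kolkata", "pune", "ahmedabad", "jaipur",
--     "₹", "inr", "rupee", "hindi", "marathi", "tamil", "telugu", "kannada"
-- ]
--
-- def is_india_based(creator: Dict) -> bool:
--     """Check if creator is India-based using country code or text indicators."""
--     if creator.get("country") == "IN":
--         return True
--
--     text = (
--         creator.get("description", "") +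
--         creator.get("channel_title", "") +
--         creator.get("sample_video_title", "")
--     ).lower()
--     return any(indicator in text for indicator in INDIA_INDICATORS)
-- ===== SOURCE B (Python) =====
-- from typing import List, Dict
--
-- INDIA_INDICATORS = [
--     "india", "bharat", "mumbai", "delhi", "bangalore", "bengaluru",
--     "hyderabad", "chennai", "kolkata", "pune", "ahmedabad", "jaipur",
--     "₹", "inr", "rupee", "hindi", "marathi", "tamil", "telugu", "kannada"
-- ]
--
-- # First-character index: maps a character to the tails of every indicator
-- # beginning with it, so each text position only tests indicators that can
-- # possibly match there.
-- _PAIRS = [(ind[0], ind[1:]) for ind in INDIA_INDICATORS]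
-- _BY_FIRST = {}
-- for _c, _tail in _PAIRS:
--     _BY_FIRST.setdefault(_c, []).append(_tail)
--
-- _FIELDS = ("description", "channel_title", "sample_video_title")
--
-- def is_india_based(creator: Dict) -> bool:
--     """India check: country code, else an indexed scan of the profile text."""
--     if "IN" == creator.get("country"):
--         return True
--     text = ""
--     for key in _FIELDS:
--         text += creator.get(key, "").lower()
--     # One left-to-right pass driven by the first-character index
--     # (str.lower maps characters independently, so lowering field by
--     # field equals lowering the concatenation).
--     for i, ch in enumerate(text):
--         for tail in _BY_FIRST.get(ch, []):
--             if text.startswith(tail, i + 1):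
--                 return True
--     return False
-- ===== Notes on version B (the rewrite author's own statement) =====
-- stated objective: alternative
-- what changed: Replaces 20 independent 'indicator in text' substring scans with a module-level first-character index (dict from first char to indicator tails) used in one text-major left-to-right pass, and lowers each field before concatenation instead of lowering the concatenation.
import Mathlib
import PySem

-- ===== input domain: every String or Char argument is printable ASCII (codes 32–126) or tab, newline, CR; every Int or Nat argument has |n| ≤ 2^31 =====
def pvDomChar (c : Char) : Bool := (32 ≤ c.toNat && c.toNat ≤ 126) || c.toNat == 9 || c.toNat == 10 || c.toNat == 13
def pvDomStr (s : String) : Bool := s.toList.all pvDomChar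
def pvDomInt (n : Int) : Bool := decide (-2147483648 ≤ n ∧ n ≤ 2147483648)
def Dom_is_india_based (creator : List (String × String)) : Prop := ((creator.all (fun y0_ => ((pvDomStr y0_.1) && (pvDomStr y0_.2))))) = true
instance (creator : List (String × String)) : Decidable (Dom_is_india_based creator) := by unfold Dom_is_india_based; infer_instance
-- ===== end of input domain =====

-- B replaces A's 20 independent substring scans by a module-level first-character index (dict: first char -> indicator tails) driving one text-major pass, with per-field lowering; alternative algorithm/data structure, same result.


-- the module-level INDIA_INDICATORS list, shared by both Pythons
def pvIndicators : List String :=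
  ["india", "bharat", "mumbai", "delhi", "bangalore", "bengaluru",
   "hyderabad", "chennai", "kolkata", "pune", "ahmedabad", "jaipur",
   "₹", "inr", "rupee", "hindi", "marathi", "tamil", "telugu", "kannada"]

-- ===== PORT A =====
def is_india_based (creator : List (String × String)) : Bool :=
  if PySem.Dict.get? ⟨creator⟩ "country" == some "IN" then
    true
  else
    pvIndicators.any (fun indicator =>
      PySem.Chars.isIn indicator.toList
        (PySem.Chars.lower
          ((PySem.Dict.getD ⟨creator⟩ "description" "").toList ++
           (PySem.Dict.getD ⟨creator⟩ "channel_title" "").toList ++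
           (PySem.Dict.getD ⟨creator⟩ "sample_video_title" "").toList)))

-- ===== PORT B =====
-- _PAIRS = [(ind[0], ind[1:]) for ind in INDIA_INDICATORS]  (every indicator is nonempty)
def pvPairs : List (Char × List Char) :=
  pvIndicators.filterMap (fun ind =>
    match ind.toList with
    | [] => none
    | c :: cs => some (c, cs))

-- _BY_FIRST: for (c, tail) in _PAIRS: _BY_FIRST.setdefault(c, []).append(tail)
def pvByFirst : PySem.Dict Char (List (List Char)) :=
  pvPairs.foldl (fun d p => d.modify p.1 [] (· ++ [p.2])) ⟨[]⟩

def pvFields : List String := ["description", "channel_title", "sample_video_title"]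

-- text = '' ; for key in _FIELDS: text += creator.get(key, '').lower()
def pvTextB (creator : List (String × String)) : List Char :=
  pvFields.foldl (fun acc key =>
    acc ++ PySem.Chars.lower (PySem.Dict.getD ⟨creator⟩ key "").toList) []

-- for i, ch in enumerate(text): for tail in _BY_FIRST.get(ch, []): if text.startswith(tail, i+1): return True
def pvScanB : List Char → Bool
  | [] => false
  | ch :: rest =>
      (PySem.Dict.getD pvByFirst ch []).any (fun tail => PySem.Chars.startswith rest tail)
        || pvScanB rest

def is_india_based_alt (creator : List (String × String)) : Bool :=
  if PySem.Dict.get? ⟨creator⟩ "country" == some "IN" then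
    true
  else
    pvScanB (pvTextB creator)

-- ===== PRECONDITION & SPEC =====
def Spec_is_india_based (creator : List (String × String)) (out : Bool) : Prop := out = is_india_based_alt creator
instance (creator : List (String × String)) (out : Bool) : Decidable (Spec_is_india_based creator out) := by unfold Spec_is_india_based; infer_instance

-- ===== CLAIM (what is proved, stated in full; the proofs are below) =====
def Claim_equal_is_india_based : Prop := ∀ (creator : List (String × String)), Dom_is_india_based creator → Spec_is_india_based creator (is_india_based creator)

-- ===== LEMMAS AND PROOFS =====

-- B's per-field lowered concatenation is A's lowered concatenation (lower is a char map)
theorem pv_text_eq (creator : List (String × String)) :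
    pvTextB creator
      = PySem.Chars.lower
          ((PySem.Dict.getD ⟨creator⟩ "description" "").toList ++
           (PySem.Dict.getD ⟨creator⟩ "channel_title" "").toList ++
           (PySem.Dict.getD ⟨creator⟩ "sample_video_title" "").toList) := by
  simp [pvTextB, pvFields, PySem.Chars.lower, List.foldl]

-- one step of A's substring test: sub occurs in c::rest iff it starts there or occurs in rest
theorem pv_isIn_cons (sub : List Char) (c : Char) (rest : List Char) :
    PySem.Chars.isIn sub (c :: rest)
      = (PySem.Chars.startswith (c :: rest) sub || PySem.Chars.isIn sub rest) := by
  rcases h : PySem.Chars.isIn sub (c :: rest) with _ | _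
  · have hn := (PySem.Chars.isIn_eq_false_iff _ _).mp h
    rw [List.infix_cons_iff] at hn
    push Not at hn
    have h1 : PySem.Chars.startswith (c :: rest) sub = false := by
      cases hs : PySem.Chars.startswith (c :: rest) sub
      · rfl
      · exact absurd ((PySem.Chars.startswith_iff _ _).mp hs) hn.1
    have h2 : PySem.Chars.isIn sub rest = false := by
      cases hs : PySem.Chars.isIn sub rest
      · rfl
      · exact absurd ((PySem.Chars.isIn_iff_infix _ _).mp hs) hn.2
    rw [h1, h2]; rfl
  · have := (PySem.Chars.isIn_iff_infix _ _).mp h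
    rw [List.infix_cons_iff] at this
    rcases this with hp | hi
    · rw [(PySem.Chars.startswith_iff _ _).mpr hp]; rfl
    · rw [(PySem.Chars.isIn_iff_infix _ _).mpr hi, Bool.or_true]

-- the pair list of a nonempty-string list tests like the strings themselves
theorem pv_pairs_any (inds : List String) (h : ∀ ind ∈ inds, ind.toList ≠ [])
    (c : Char) (rest : List Char) :
    (inds.filterMap (fun ind =>
        match ind.toList with
        | [] => none
        | c0 :: cs => some (c0, cs))).any
        (fun p => (p.1 == c) && PySem.Chars.startswith rest p.2)
      = inds.any (fun ind => PySem.Chars.startswith (c :: rest) ind.toList) := by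
  induction inds with
  | nil => rfl
  | cons ind tl ih =>
    have hne : ind.toList ≠ [] := h ind (List.mem_cons_self ..)
    cases hl : ind.toList with
    | nil => exact absurd hl hne
    | cons c0 cs =>
      have ih' := ih (fun i hi => h i (List.mem_cons_of_mem _ hi))
      simp only [List.filterMap_cons, hl, List.any_cons, ih']
      rw [show PySem.Chars.startswith (c :: rest) (c0 :: cs)
            = (c0 == c && PySem.Chars.startswith rest cs) from rfl]

-- lookup in the first-character index = testing all indicators at this position
theorem pv_index_any (c : Char) (rest : List Char) :
    (PySem.Dict.getD pvByFirst c []).any (fun tail => PySem.Chars.startswith rest tail)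
      = pvIndicators.any (fun ind => PySem.Chars.startswith (c :: rest) ind.toList) := by
  rw [pvByFirst, PySem.Dict.getD_foldl_modify_append]
  rw [show (PySem.Dict.getD (⟨[]⟩ : PySem.Dict Char (List (List Char))) c []) = [] from rfl]
  rw [List.nil_append, List.any_map, ← pv_pairs_any pvIndicators (by decide) c rest, pvPairs]
  rw [List.any_filter]
  rfl

-- A's indicator-major membership test equals B's index-driven position-major scan
theorem pv_scan_eq (text : List Char) :
    pvIndicators.any (fun indicator => PySem.Chars.isIn indicator.toList text) = pvScanB text := by
  induction text with
  | nil => decide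
  | cons c rest ih =>
    rw [pvScanB, ← ih, pv_index_any]
    simp only [pv_isIn_cons]
    rw [Bool.eq_iff_iff]
    simp only [List.any_eq_true, Bool.or_eq_true]
    exact ⟨fun ⟨x, hx, h⟩ => h.elim (fun h => Or.inl ⟨x, hx, h⟩) (fun h => Or.inr ⟨x, hx, h⟩),
      fun h => h.elim (fun ⟨x, hx, h⟩ => ⟨x, hx, Or.inl h⟩) (fun ⟨x, hx, h⟩ => ⟨x, hx, Or.inr h⟩)⟩

-- ===== VERDICT (by name: the statement is the Claim_ definition above) =====
theorem is_india_based_spec : Claim_equal_is_india_based := by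
  intro creator _
  unfold Spec_is_india_based is_india_based is_india_based_alt
  cases h : (PySem.Dict.get? ⟨creator⟩ "country" == some "IN")
  · simp [pv_text_eq, pv_scan_eq]
  · simp
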